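-- pv_equiv track=rewrite | github.com/arav-raval/atf_form_index | VersionClassifierModel/evaluate.py | is_permissible
-- ===== SOURCE A (Python) =====
-- PERMISSIBLE_GROUPS: list[set[str]] = [
--     {"2005", "2007"},
--     {"2008", "2012"},
--     {"2020", "2022", "2023"},
-- ]
--
-- def is_permissible(true_lbl: int, pred_lbl: int,
--                    idx_to_label: dict[int, str]) -> bool:
--     true_name = idx_to_label[true_lbl]
--     pred_name = idx_to_label[pred_lbl]
--     for suffix in ("_serial", "_continuation"):
--         if true_name.endswith(suffix) and pred_name.endswith(suffix):
--             true_year = true_name.removesuffix(suffix)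
--             pred_year = pred_name.removesuffix(suffix)
--             return any(true_year in g and pred_year in g for g in PERMISSIBLE_GROUPS)
--     return False
-- ===== SOURCE B (Python) =====
-- # The permissibility relation materialized once as a set of ordered full-label
-- # pairs: (y1+s, y2+s) for every pair of years in the same group and each suffix.
-- _PERMISSIBLE_PAIRS = frozenset(
--     (y1 + s, y2 + s)
--     for g in ({"2005", "2007"}, {"2008", "2012"}, {"2020", "2022", "2023"})
--     for y1 in g
--     for y2 in g
--     for s in ("_serial", "_continuation")
-- )
--
--
-- def is_permissible(true_lbl: int, pred_lbl: int,
--                    idx_to_label: dict[int, str]) -> bool: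
--     return (idx_to_label[true_lbl], idx_to_label[pred_lbl]) in _PERMISSIBLE_PAIRS
-- ===== Notes on version B (the rewrite author's own statement) =====
-- stated objective: simpler
-- what changed: B materializes the whole permissibility relation once as a precomputed frozenset of ordered full-label pairs (year+suffix, year+suffix), so the call is a single pair-membership test with no suffix loop, no string splitting and no scan over the groups.
import Mathlib
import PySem

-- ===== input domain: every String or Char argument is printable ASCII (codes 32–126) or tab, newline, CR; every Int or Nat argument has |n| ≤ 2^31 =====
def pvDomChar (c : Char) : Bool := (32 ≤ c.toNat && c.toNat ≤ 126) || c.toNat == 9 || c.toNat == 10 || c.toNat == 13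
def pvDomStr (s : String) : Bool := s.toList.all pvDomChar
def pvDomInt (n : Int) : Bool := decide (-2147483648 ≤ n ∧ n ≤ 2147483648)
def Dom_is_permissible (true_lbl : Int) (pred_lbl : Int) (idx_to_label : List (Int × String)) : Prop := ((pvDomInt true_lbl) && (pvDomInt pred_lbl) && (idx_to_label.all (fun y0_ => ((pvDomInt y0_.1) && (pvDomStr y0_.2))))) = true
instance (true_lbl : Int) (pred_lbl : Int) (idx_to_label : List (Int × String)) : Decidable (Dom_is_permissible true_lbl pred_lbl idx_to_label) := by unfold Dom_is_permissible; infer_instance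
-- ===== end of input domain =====

-- B materializes the permissibility relation once as a precomputed set of ordered
-- full-label pairs and answers with a single pair-membership test (simpler: no
-- suffix loop, no splitting, no group scan at call time).


-- ===== PORT A =====
def PERMISSIBLE_GROUPS : List (PySem.Set String) :=
  [PySem.Set.ofList ["2005", "2007"],
   PySem.Set.ofList ["2008", "2012"],
   PySem.Set.ofList ["2020", "2022", "2023"]]

-- the 'for suffix in (…)' loop; removesuffix is ported as name[:-len(suffix)],
-- exact here because it is applied only after endswith succeeded and the suffix is nonempty
def pvSuffixLoopA (tn pn : String) : List String → Bool
  | [] => false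
  | s :: rest =>
    if PySem.Str.endswith tn s && PySem.Str.endswith pn s then
      let ty := PySem.Str.slice tn none (some (-(PySem.Str.len s)))
      let py := PySem.Str.slice pn none (some (-(PySem.Str.len s)))
      PERMISSIBLE_GROUPS.any (fun g => PySem.Set.contains g ty && PySem.Set.contains g py)
    else pvSuffixLoopA tn pn rest

def is_permissible (true_lbl : Int) (pred_lbl : Int) (idx_to_label : List (Int × String)) : Bool :=
  match PySem.Dict.get? (PySem.Dict.mk idx_to_label) true_lbl,
        PySem.Dict.get? (PySem.Dict.mk idx_to_label) pred_lbl with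
  | some tn, some pn => pvSuffixLoopA tn pn ["_serial", "_continuation"]
  | _, _ => false  -- KeyError in Python: outside Pre_

-- ===== PORT B =====
-- the frozenset comprehension of Source B; it is only membership-tested afterwards,
-- so the set-iteration order chosen for the groups cannot influence the result
def PERMISSIBLE_PAIRS : PySem.Set (String × String) :=
  PySem.Set.ofList
    (([PySem.Set.ofList ["2005", "2007"],
       PySem.Set.ofList ["2008", "2012"],
       PySem.Set.ofList ["2020", "2022", "2023"]] : List (PySem.Set String)).flatMap (fun g =>
      g.flatMap (fun y1 =>
        g.flatMap (fun y2 =>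
          ["_serial", "_continuation"].map (fun s => (y1 ++ s, y2 ++ s))))))

def is_permissible_alt (true_lbl : Int) (pred_lbl : Int) (idx_to_label : List (Int × String)) : Bool :=
  match PySem.Dict.get? (PySem.Dict.mk idx_to_label) true_lbl with
  | none => false  -- KeyError in Python: outside Pre_
  | some tn =>
    match PySem.Dict.get? (PySem.Dict.mk idx_to_label) pred_lbl with
    | none => false  -- KeyError in Python: outside Pre_
    | some pn => PySem.Set.contains PERMISSIBLE_PAIRS (tn, pn)

-- ===== PRECONDITION & SPEC =====
-- Pre_ excludes exactly the inputs where Python A raises KeyError (a label index missing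
-- from idx_to_label); B raises there too.
def Pre_is_permissible (true_lbl : Int) (pred_lbl : Int) (idx_to_label : List (Int × String)) : Prop :=
  true_lbl ∈ idx_to_label.map Prod.fst ∧ pred_lbl ∈ idx_to_label.map Prod.fst
instance (true_lbl : Int) (pred_lbl : Int) (idx_to_label : List (Int × String)) : Decidable (Pre_is_permissible true_lbl pred_lbl idx_to_label) := by unfold Pre_is_permissible; infer_instance

def pvWitness_is_permissible : Int × Int × (List (Int × String)) :=
  (0, 1, [(0, "2005_serial"), (1, "2007_serial")])

def Spec_is_permissible (true_lbl : Int) (pred_lbl : Int) (idx_to_label : List (Int × String)) (out : Bool) : Prop := out = is_permissible_alt true_lbl pred_lbl idx_to_label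
instance (true_lbl : Int) (pred_lbl : Int) (idx_to_label : List (Int × String)) (out : Bool) : Decidable (Spec_is_permissible true_lbl pred_lbl idx_to_label out) := by unfold Spec_is_permissible; infer_instance

-- ===== CLAIM (what is proved, stated in full; the proofs are below) =====
def Claim_equal_is_permissible : Prop := ∀ (true_lbl : Int) (pred_lbl : Int) (idx_to_label : List (Int × String)), Dom_is_permissible true_lbl pred_lbl idx_to_label → Pre_is_permissible true_lbl pred_lbl idx_to_label → Spec_is_permissible true_lbl pred_lbl idx_to_label (is_permissible true_lbl pred_lbl idx_to_label)

-- ===== LEMMAS AND PROOFS =====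

def pvYears : List String := ["2005", "2007", "2008", "2012", "2020", "2022", "2023"]

-- no string ends with both "_serial" and "_continuation"
lemma pv_not_both (s : String) :
    ¬ (PySem.Str.endswith s "_serial" = true ∧ PySem.Str.endswith s "_continuation" = true) := by
  rintro ⟨h1, h2⟩
  simp only [PySem.Str.endswith_eq, PySem.Chars.endswith_iff] at h1 h2
  have : ("_serial".toList) <:+ ("_continuation".toList) :=
    List.suffix_of_suffix_length_le h1 h2 (by decide)
  revert this; decide

-- one unfolding step of the loop (definitional)
lemma pv_loopA_cons (tn pn s : String) (rest : List String) :
    pvSuffixLoopA tn pn (s :: rest) =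
      (if PySem.Str.endswith tn s && PySem.Str.endswith pn s then
        PERMISSIBLE_GROUPS.any (fun g => PySem.Set.contains g (PySem.Str.slice tn none (some (-(PySem.Str.len s)))) && PySem.Set.contains g (PySem.Str.slice pn none (some (-(PySem.Str.len s)))))
      else pvSuffixLoopA tn pn rest) := rfl
lemma pv_loopA_nil (tn pn : String) : pvSuffixLoopA tn pn [] = false := rfl

-- endswith decomposes a name into its sliced stem and the suffix
lemma pv_decomp (n s : String) (hk : s.toList ≠ [])
    (h : PySem.Str.endswith n s = true) :
    n.toList = (PySem.Str.slice n none (some (-(PySem.Str.len s)))).toList ++ s.toList := by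
  have hsuf : s.toList <:+ n.toList := by
    simpa only [PySem.Str.endswith_eq, PySem.Chars.endswith_iff] using h
  obtain ⟨t, ht⟩ := hsuf
  have hlen : 0 < s.toList.length := List.length_pos_iff.mpr hk
  have : (PySem.Str.slice n none (some (-(PySem.Str.len s)))).toList
      = n.toList.take (n.toList.length - s.toList.length) := by
    simp only [PySem.Str.toList_slice, PySem.Str.len_eq]
    exact PySem.List.slice_to_neg_natCast n.toList s.toList.length hlen
  rw [this, ← ht]
  have hl : (t ++ s.toList).length - s.toList.length = t.length := by simp
  rw [hl, List.take_left]

-- a year not in the fixed list is in none of the groups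
lemma pv_notin_groups (y : String) (hy : y ∉ pvYears) :
    ∀ g ∈ PERMISSIBLE_GROUPS, PySem.Set.contains g y = false := by
  intro g hg
  simp only [pvYears, List.mem_cons, List.not_mem_nil, or_false, not_or] at hy
  fin_cases hg <;>
    simp [PySem.Set.contains_eq_listContains, PySem.Set.ofList, List.contains_eq_mem,
          hy.1, hy.2.1, hy.2.2.1, hy.2.2.2.1, hy.2.2.2.2.1, hy.2.2.2.2.2.1, hy.2.2.2.2.2.2]

-- (tn, pn) is not a permissible pair when tn's stem is no listed year
lemma pv_notmem_fst (s ty tn pn : String)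
    (hs : s = "_serial" ∨ s = "_continuation")
    (ht : tn.toList = ty.toList ++ s.toList)
    (hy : ty ∉ pvYears) :
    PySem.Set.contains PERMISSIBLE_PAIRS (tn, pn) = false := by
  rw [Bool.eq_false_iff]
  intro hc
  have hm : (tn, pn) ∈ PERMISSIBLE_PAIRS := (PySem.Set.contains_iff _ _).mp hc
  have key : ∀ pr ∈ PERMISSIBLE_PAIRS, ∀ s' ∈ (["_serial", "_continuation"] : List String),
      (∃ y ∈ pvYears, pr.1.toList = y.toList ++ s'.toList) ∨ ¬ (s'.toList <:+ pr.1.toList) := by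
    decide
  have hs' : s ∈ (["_serial", "_continuation"] : List String) := by
    rcases hs with rfl | rfl <;> simp
  rcases key _ hm s hs' with ⟨y, hym, hey⟩ | hns
  · have : ty = y := String.toList_inj.mp (by
      have := ht.symm.trans hey
      exact (List.append_left_inj s.toList).mp this)
    exact hy (this ▸ hym)
  · exact hns (ht ▸ List.suffix_append _ _)

-- symmetric: pn's stem is no listed year
lemma pv_notmem_snd (s py tn pn : String)
    (hs : s = "_serial" ∨ s = "_continuation")
    (hp : pn.toList = py.toList ++ s.toList)
    (hy : py ∉ pvYears) :
    PySem.Set.contains PERMISSIBLE_PAIRS (tn, pn) = false := by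
  rw [Bool.eq_false_iff]
  intro hc
  have hm : (tn, pn) ∈ PERMISSIBLE_PAIRS := (PySem.Set.contains_iff _ _).mp hc
  have key : ∀ pr ∈ PERMISSIBLE_PAIRS, ∀ s' ∈ (["_serial", "_continuation"] : List String),
      (∃ y ∈ pvYears, pr.2.toList = y.toList ++ s'.toList) ∨ ¬ (s'.toList <:+ pr.2.toList) := by
    decide
  have hs' : s ∈ (["_serial", "_continuation"] : List String) := by
    rcases hs with rfl | rfl <;> simp
  rcases key _ hm s hs' with ⟨y, hym, hey⟩ | hns
  · have : py = y := String.toList_inj.mp (by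
      have := hp.symm.trans hey
      exact (List.append_left_inj s.toList).mp this)
    exact hy (this ▸ hym)
  · exact hns (hp ▸ List.suffix_append _ _)

-- A's group scan on the stems equals B's pair lookup, same suffix on both names
set_option maxRecDepth 16384 in
lemma pv_bridge (s ty py tn pn : String)
    (hs : s = "_serial" ∨ s = "_continuation")
    (ht : tn.toList = ty.toList ++ s.toList)
    (hp : pn.toList = py.toList ++ s.toList) :
    (PERMISSIBLE_GROUPS.any (fun g => PySem.Set.contains g ty && PySem.Set.contains g py))
      = PySem.Set.contains PERMISSIBLE_PAIRS (tn, pn) := by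
  by_cases hty : ty ∈ pvYears
  · by_cases hpy : py ∈ pvYears
    · have htn : tn = ty ++ s := String.toList_inj.mp (by rw [ht]; simp)
      have hpn : pn = py ++ s := String.toList_inj.mp (by rw [hp]; simp)
      subst htn hpn
      rcases hs with rfl | rfl <;> fin_cases hty <;> fin_cases hpy <;> decide
    · rw [pv_notmem_snd s py tn pn hs hp hpy]
      simp only [List.any_eq_false]
      intro g hg h
      rw [Bool.and_eq_true] at h
      rw [pv_notin_groups py hpy g hg] at h
      exact Bool.false_ne_true h.2
  · rw [pv_notmem_fst s ty tn pn hs ht hty]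
    simp only [List.any_eq_false]
    intro g hg h
    rw [Bool.and_eq_true] at h
    rw [pv_notin_groups ty hty g hg] at h
    exact Bool.false_ne_true h.1

-- neither branch of A fires ⇒ the pair is not in B's set either
lemma pv_notmem_mismatch (tn pn : String)
    (h1 : ¬ (PySem.Str.endswith tn "_serial" = true ∧ PySem.Str.endswith pn "_serial" = true))
    (h2 : ¬ (PySem.Str.endswith tn "_continuation" = true ∧ PySem.Str.endswith pn "_continuation" = true)) :
    PySem.Set.contains PERMISSIBLE_PAIRS (tn, pn) = false := by
  rw [Bool.eq_false_iff]
  intro hc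
  have hm : (tn, pn) ∈ PERMISSIBLE_PAIRS := (PySem.Set.contains_iff _ _).mp hc
  have key : ∀ pr ∈ PERMISSIBLE_PAIRS,
      (PySem.Str.endswith pr.1 "_serial" = true ∧ PySem.Str.endswith pr.2 "_serial" = true) ∨
      (PySem.Str.endswith pr.1 "_continuation" = true ∧ PySem.Str.endswith pr.2 "_continuation" = true) := by
    decide
  rcases key _ hm with h | h
  · exact h1 h
  · exact h2 h

-- the two programs' cores agree on any pair of names
lemma pv_core (tn pn : String) :
    pvSuffixLoopA tn pn ["_serial", "_continuation"]
      = PySem.Set.contains PERMISSIBLE_PAIRS (tn, pn) := by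
  rw [pv_loopA_cons]
  by_cases hts : PySem.Str.endswith tn "_serial" = true
  · by_cases hps : PySem.Str.endswith pn "_serial" = true
    · simp only [hts, hps, Bool.and_self, if_true]
      exact pv_bridge "_serial" _ _ tn pn (Or.inl rfl)
        (pv_decomp tn "_serial" (by decide) hts) (pv_decomp pn "_serial" (by decide) hps)
    · simp only [Bool.not_eq_true] at hps
      simp only [hts, hps, Bool.and_false]
      rw [pv_loopA_cons]
      have htc : PySem.Str.endswith tn "_continuation" = false := by
        rw [Bool.eq_false_iff]; intro h; exact pv_not_both tn ⟨hts, h⟩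
      simp only [htc, Bool.false_and, pv_loopA_nil]
      exact (pv_notmem_mismatch tn pn
        (fun h => by rw [hps] at h; exact Bool.false_ne_true h.2)
        (fun h => by rw [htc] at h; exact Bool.false_ne_true h.1)).symm
  · simp only [Bool.not_eq_true] at hts
    simp only [hts, Bool.false_and]
    rw [pv_loopA_cons]
    by_cases htc : PySem.Str.endswith tn "_continuation" = true
    · by_cases hpc : PySem.Str.endswith pn "_continuation" = true
      · simp only [htc, hpc, Bool.and_self, if_true, pv_loopA_nil]
        exact pv_bridge "_continuation" _ _ tn pn (Or.inr rfl)
          (pv_decomp tn "_continuation" (by decide) htc)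
          (pv_decomp pn "_continuation" (by decide) hpc)
      · simp only [Bool.not_eq_true] at hpc
        simp only [htc, hpc, Bool.and_false, pv_loopA_nil]
        exact (pv_notmem_mismatch tn pn
          (fun h => by rw [hts] at h; exact Bool.false_ne_true h.1)
          (fun h => by rw [hpc] at h; exact Bool.false_ne_true h.2)).symm
    · simp only [Bool.not_eq_true] at htc
      simp only [htc, Bool.false_and, pv_loopA_nil]
      exact (pv_notmem_mismatch tn pn
        (fun h => by rw [hts] at h; exact Bool.false_ne_true h.1)
        (fun h => by rw [htc] at h; exact Bool.false_ne_true h.1)).symm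

-- ===== VERDICT (by name: the statement is the Claim_ definition above) =====
theorem is_permissible_spec : Claim_equal_is_permissible := by
  intro t p d _ hpre
  unfold Spec_is_permissible is_permissible is_permissible_alt
  obtain ⟨ht, hp⟩ := hpre
  have ht' : PySem.Dict.get? (PySem.Dict.mk d) t ≠ none := by
    simp only [ne_eq, PySem.Dict.get?_eq_none_iff_not_mem_keys, PySem.Dict.keys_mk]
    simpa using ht
  have hp' : PySem.Dict.get? (PySem.Dict.mk d) p ≠ none := by
    simp only [ne_eq, PySem.Dict.get?_eq_none_iff_not_mem_keys, PySem.Dict.keys_mk]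
    simpa using hp
  obtain ⟨tn, htn⟩ := Option.ne_none_iff_exists'.mp ht'
  obtain ⟨pn, hpn⟩ := Option.ne_none_iff_exists'.mp hp'
  rw [htn, hpn]
  exact pv_core tn pn
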